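-- pv_equiv track=rewrite | github.com/alclass/cxlots | fs/mathfs/combinatorics/lgi_lexicographical_indices_to_from.py | is_combination_consistent_w_nelements
-- ===== SOURCE A (Python) =====
-- def is_combination_consistent_w_nelements(cmbset, n_elements):
--   """
--   # check 1: cmbset should not be None or empty or with n_elements < 1
--     (n_slots does not affect consistency though used for ordering checking)
--   # check 2: combset should be in ascending order: valid [1,2,3], invalid [3,2,1]
--   # check 3: first element should be greater than -1
--              (resulting in all of them being non-negative, because they are in ascending order)
--   # check 4: last element should be lesser than n_elements
--              (resulting in every element being less than n_elements, for the same reason, ascending order)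
--
--   Former checkings removed because they were somehow redundant:
--     # check the 'unit' (or least sized) set, ie if n_elements == 1, set is [0]
--       => checks 3 and 4 cover this
--     # should not have repeated elements: valid [1,2,3], invalid [1,2,2,3]
--       => ascending order (check 2) covers this
--     # should not have negative numbers: invalid [-3,-2,-1], though valid in asc order
--       => suffice checking the first element (check 3), no need to check them all (because of ascending order)
--     # should not have elements greater than upper limit, which is n_elements - 1
--       => suffice checking the last element (check 4), idem
--
--   Args:
--     cmbset: list the combination set
--     n_elements: int the number of elements in combination
--
--   Returns:
--     False | True
--   """
--   # check 1: cmbset should not be None or empty or with n_elements < 1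
--   if cmbset is None or len(cmbset) == 0 or n_elements < 1:
--     # errmsg = f"combination (=[{cmbset}) is None or len(cmbset) == 0 or n_elements (={n_elements}) < 1."
--     # raise ValueError(errmsg)
--     return False
--   n_slots = len(cmbset)  # n_slots is not a function's parameter, it's used for checking ascending order
--   # check 2: combset should be in ascending order: valid [1,2,3], invalid [3,2,1]
--   bool_list_chk_asc_order = [cmbset[i] < cmbset[i+1] for i in range(n_slots-1)]
--   if False in bool_list_chk_asc_order:
--     # errmsg = f"combination (=[{cmbset}) is not in ascending order."
--     # raise ValueError(errmsg)
--     return False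
--   # check 3: first element should be greater than -1 (resulting in all of them being non-negative)
--   first_element = cmbset[0]
--   if first_element < 0:
--     # errmsg = f"combination (=[{cmbset}) has negative numbers."
--     # raise ValueError(errmsg)
--     return False
--   # check 4: last element should be lesser than n_elements
--   # (resulting in every element being less than n_elements)
--   last_element = cmbset[-1]
--   if last_element > n_elements - 1:
--     # errmsg = f"combination (=[{cmbset}) has elements greater than upper limit."
--     # raise ValueError(errmsg)
--     return False
--   return True
-- ===== SOURCE B (Python) =====
-- def is_combination_consistent_w_nelements(cmbset, n_elements):
--     # Same guard as A: None, empty, or n_elements < 1 is inconsistent.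
--     if cmbset is None or len(cmbset) == 0 or n_elements < 1:
--         return False
--     # Strictly ascending == already sorted and duplicate-free; bounds via global min/max.
--     return (list(cmbset) == sorted(cmbset)
--             and len(set(cmbset)) == len(cmbset)
--             and min(cmbset) >= 0
--             and max(cmbset) <= n_elements - 1)
-- ===== Notes on version B (the rewrite author's own statement) =====
-- stated objective: alternative
-- what changed: Replaces the adjacent-pair ascending scan plus first/last bounds checks with a sort-and-compare validation: list == sorted(list) with a distinctness check captures strict ascent, and global min/max give the bounds.
import Mathlib
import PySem

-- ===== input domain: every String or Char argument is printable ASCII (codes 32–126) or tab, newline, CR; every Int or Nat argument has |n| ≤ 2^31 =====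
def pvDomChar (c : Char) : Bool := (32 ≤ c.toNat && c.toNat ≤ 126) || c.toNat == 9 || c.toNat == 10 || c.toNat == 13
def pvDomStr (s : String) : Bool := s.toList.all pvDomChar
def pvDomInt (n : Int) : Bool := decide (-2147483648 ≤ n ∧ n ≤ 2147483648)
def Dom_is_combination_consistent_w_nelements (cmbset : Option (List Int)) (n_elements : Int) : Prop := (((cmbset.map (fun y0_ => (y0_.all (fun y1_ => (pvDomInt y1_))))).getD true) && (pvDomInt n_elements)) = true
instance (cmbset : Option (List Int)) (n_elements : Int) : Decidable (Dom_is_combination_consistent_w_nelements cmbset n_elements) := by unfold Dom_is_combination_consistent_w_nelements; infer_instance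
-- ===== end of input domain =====

-- B validates by sort-and-compare (xs == sorted(xs), distinctness, global min/max bounds)
-- instead of A's adjacent-pair ascending scan with first/last bounds checks; objective: alternative.


-- ===== PORT A =====
-- literal transliteration of A; all list indices used are in range, so pyGetD is exact here
def is_combination_consistent_w_nelements (cmbset : Option (List Int)) (n_elements : Int) : Bool :=
  match cmbset with
  | none => false
  | some xs =>
    if xs.length = 0 ∨ n_elements < 1 then false
    else
      let n_slots : Int := xs.length
      let bool_list_chk_asc_order :=
        (PySem.List.pyRange 0 (n_slots - 1) 1).map
          (fun i => decide (PySem.List.pyGetD xs i 0 < PySem.List.pyGetD xs (i + 1) 0))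
      if false ∈ bool_list_chk_asc_order then false
      else
        let first_element := PySem.List.pyGetD xs 0 0
        if first_element < 0 then false
        else
          let last_element := PySem.List.pyGetD xs (-1) 0
          if last_element > n_elements - 1 then false
          else true

-- ===== PORT B =====
def is_combination_consistent_w_nelements_alt (cmbset : Option (List Int)) (n_elements : Int) : Bool :=
  match cmbset with
  | none => false
  | some xs =>
    if xs.length = 0 ∨ n_elements < 1 then false
    else
      decide (xs = PySem.List.sorted xs (fun x => x) false) &&
      decide ((PySem.Set.ofList xs).length = xs.length) &&
      decide (0 ≤ (PySem.List.min? xs (fun x => x)).getD 0) &&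
      decide ((PySem.List.max? xs (fun x => x)).getD 0 ≤ n_elements - 1)

-- ===== PRECONDITION & SPEC =====
def Spec_is_combination_consistent_w_nelements (cmbset : Option (List Int)) (n_elements : Int) (out : Bool) : Prop := out = is_combination_consistent_w_nelements_alt cmbset n_elements
instance (cmbset : Option (List Int)) (n_elements : Int) (out : Bool) : Decidable (Spec_is_combination_consistent_w_nelements cmbset n_elements out) := by unfold Spec_is_combination_consistent_w_nelements; infer_instance

-- ===== CLAIM (what is proved, stated in full; the proofs are below) =====
def Claim_equal_is_combination_consistent_w_nelements : Prop := ∀ (cmbset : Option (List Int)) (n_elements : Int), Dom_is_combination_consistent_w_nelements cmbset n_elements → Spec_is_combination_consistent_w_nelements cmbset n_elements (is_combination_consistent_w_nelements cmbset n_elements)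

-- ===== LEMMAS AND PROOFS =====

-- A's adjacent-pair scan finds no violation iff the list is strictly pairwise increasing.
lemma pv_noFalse_iff_pairwise (xs : List Int) :
    (false ∉ (PySem.List.pyRange 0 ((xs.length : Int) - 1) 1).map
      (fun i => decide (PySem.List.pyGetD xs i 0 < PySem.List.pyGetD xs (i + 1) 0)))
    ↔ xs.Pairwise (· < ·) := by
  rw [← List.isChain_iff_pairwise, List.isChain_iff_getElem]
  constructor
  · intro h i hi
    by_contra hlt
    apply h
    rw [List.mem_map]
    refine ⟨(i : Int), ?_, ?_⟩
    · rw [PySem.List.mem_pyRange_one]; constructor <;> omega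
    · rw [PySem.List.pyGetD_eq_getElem _ _ (by omega) (by omega),
          PySem.List.pyGetD_eq_getElem _ _ (by omega) (by omega)]
      rw [decide_eq_false_iff_not]
      intro hc
      apply hlt
      convert hc using 2
  · intro h hb
    rw [List.mem_map] at hb
    obtain ⟨i, hmem, hi⟩ := hb
    rw [PySem.List.mem_pyRange_one] at hmem
    obtain ⟨h0, h1⟩ := hmem
    rw [PySem.List.pyGetD_eq_getElem _ _ (by omega) (by omega),
        PySem.List.pyGetD_eq_getElem _ _ (by omega) (by omega)] at hi
    rw [decide_eq_false_iff_not] at hi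
    apply hi
    convert h i.toNat (by omega) using 2
    omega

-- len(set(xs)) always equals the number of distinct elements, i.e. the length of Mathlib's dedup.
lemma pv_ofList_length (xs : List Int) :
    (PySem.Set.ofList xs).length = xs.dedup.length := by
  apply List.Perm.length_eq
  rw [List.perm_ext_iff_of_nodup (PySem.Set.nodup_ofList xs) (List.nodup_dedup xs)]
  intro a
  rw [PySem.Set.mem_ofList, List.mem_dedup]

lemma pv_ofList_length_iff_nodup (xs : List Int) :
    (PySem.Set.ofList xs).length = xs.length ↔ xs.Nodup := by
  rw [pv_ofList_length]
  constructor
  · intro h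
    have := (List.dedup_sublist xs).eq_of_length h
    rw [← this]; exact List.nodup_dedup xs
  · intro h; rw [h.dedup]

-- under strict ascent the first element is the minimum and the last the maximum
lemma pv_min_eq_head (x : Int) (t : List Int) (h : (x :: t).Pairwise (· < ·)) :
    (PySem.List.min? (x :: t) (fun y => y)).getD 0 = x := by
  obtain ⟨m, hm⟩ := Option.ne_none_iff_exists'.mp
    (fun hc => by simp [PySem.List.min?_eq_none_iff] at hc : PySem.List.min? (x :: t) (fun y => y) ≠ none)
  rw [hm, Option.getD_some]
  have hmem := PySem.List.min?_mem hm
  have hmin := PySem.List.min?_isMin hm x (by simp)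
  rcases List.mem_cons.mp hmem with rfl | hmt
  · rfl
  · have := (List.pairwise_cons.mp h).1 m hmt
    omega

lemma pv_max_eq_getLast (xs : List Int) (hne : xs ≠ []) (h : xs.Pairwise (· < ·)) :
    (PySem.List.max? xs (fun y => y)).getD 0 = xs.getLast hne := by
  obtain ⟨m, hm⟩ := Option.ne_none_iff_exists'.mp
    (fun hc => by rw [PySem.List.max?_eq_none_iff] at hc; exact hne hc : PySem.List.max? xs (fun y => y) ≠ none)
  rw [hm, Option.getD_some]
  have hmem := PySem.List.max?_mem hm
  have hmax := PySem.List.max?_isMax hm (xs.getLast hne) (List.getLast_mem hne)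
  -- every element is ≤ the last element, by pairwise monotonicity
  have hlast : ∀ y ∈ xs, y ≤ xs.getLast hne := by
    intro y hy
    rw [List.pairwise_iff_getElem] at h
    obtain ⟨i, hi, rfl⟩ := List.getElem_of_mem hy
    rw [List.getLast_eq_getElem]
    rcases Nat.lt_or_ge i (xs.length - 1) with hlt | hge
    · exact le_of_lt (h i (xs.length - 1) hi (by omega) hlt)
    · have : i = xs.length - 1 := by omega
      subst this; exact le_refl _
  exact le_antisymm (hlast m hmem) hmax

-- ===== VERDICT (by name: the statement is the Claim_ definition above) =====
theorem is_combination_consistent_w_nelements_spec : Claim_equal_is_combination_consistent_w_nelements := by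
  intro cmbset n_elements _
  unfold Spec_is_combination_consistent_w_nelements
  cases cmbset with
  | none => rfl
  | some xs =>
    simp only [is_combination_consistent_w_nelements, is_combination_consistent_w_nelements_alt]
    by_cases h1 : xs.length = 0 ∨ n_elements < 1
    · rw [if_pos h1, if_pos h1]
    · rw [if_neg h1, if_neg h1]
      have hne : xs ≠ [] := by
        intro hc; subst hc; exact h1 (Or.inl rfl)
      by_cases hp : xs.Pairwise (· < ·)
      · -- strictly ascending: A checks first/last, B checks min/max
        have hnofalse := (pv_noFalse_iff_pairwise xs).mpr hp
        rw [if_neg hnofalse]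
        have hsorted : PySem.List.sorted xs (fun x => x) false = xs :=
          PySem.List.sorted_eq_of_perm_of_pairwise_lt xs xs (fun x => x) (List.Perm.refl xs) hp
        have hnodup : xs.Nodup := hp.imp ne_of_lt
        rw [hsorted]
        simp only [(pv_ofList_length_iff_nodup xs).mpr hnodup, decide_true, Bool.true_and,
          ]
        obtain ⟨x, t, rfl⟩ := List.exists_cons_of_ne_nil hne
        rw [pv_min_eq_head x t hp, pv_max_eq_getLast (x :: t) hne hp,
            PySem.List.pyGetD_zero_cons, PySem.List.pyGetD_neg_one _ _ hne]
        split_ifs with hf hl <;> simp <;> omega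
      · -- not strictly ascending: A returns false; B fails sortedness or distinctness
        have hfalse : false ∈ (PySem.List.pyRange 0 ((xs.length : Int) - 1) 1).map
            (fun i => decide (PySem.List.pyGetD xs i 0 < PySem.List.pyGetD xs (i + 1) 0)) := by
          by_contra hc; exact hp ((pv_noFalse_iff_pairwise xs).mp hc)
        rw [if_pos hfalse]
        by_cases hs : xs = PySem.List.sorted xs (fun x => x) false
        · by_cases hd : (PySem.Set.ofList xs).length = xs.length
          · exfalso
            apply hp
            have hle : xs.Pairwise (fun a b => a ≤ b) := by
              have := PySem.List.sorted_pairwise (xs := xs) (key := fun x => x)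
              rw [← hs] at this
              exact this
            have hnd : xs.Nodup := (pv_ofList_length_iff_nodup xs).mp hd
            exact (hle.and hnd).imp (fun h => lt_of_le_of_ne h.1 h.2)
          · simp [hd]
        · simp [hs]
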